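-- pv_equiv track=rewrite | github.com/hollowsolve/Specify | src/engine/processors/contradiction_finder.py | _find_requirements_with_semantic_conflict
-- ===== SOURCE A (Python) =====
-- from typing import List, Dict, Any, Tuple, Optional, Set
--
-- def _find_requirements_with_semantic_conflict(requirements: List[str],
--                                             positive_terms: List[str],
--                                             negative_terms: List[str]) -> Tuple[str, str]:
--     """Find requirements with semantic conflicts."""
--     positive_req = None
--     negative_req = None
--
--     for req in requirements:
--         req_lower = req.lower()
--         if any(term.lower() in req_lower for term in positive_terms):
--             positive_req = req
--         if any(term.lower() in req_lower for term in negative_terms):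
--             negative_req = req
--
--     return (
--         positive_req or (requirements[0] if requirements else "Unknown"),
--         negative_req or (requirements[1] if len(requirements) > 1 else "Unknown")
--     )
-- ===== SOURCE B (Python) =====
-- def _find_requirements_with_semantic_conflict(requirements, positive_terms, negative_terms):
--     """Find requirements with semantic conflicts (two independent reverse scans)."""
--     def last_match(terms):
--         lows = [t.lower() for t in terms]
--         for req in reversed(requirements):
--             req_lower = req.lower()
--             if any(t in req_lower for t in lows):
--                 return req
--         return None
--
--     positive_req = last_match(positive_terms)
--     negative_req = last_match(negative_terms)
--     return (
--         positive_req or (requirements[0] if requirements else "Unknown"),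
--         negative_req or (requirements[1] if len(requirements) > 1 else "Unknown")
--     )
-- ===== Notes on version B (the rewrite author's own statement) =====
-- stated objective: faster
-- what changed: Replaced the single forward pass that keeps updating two last-match trackers by two independent reverse scans (lowered terms precomputed) that each return on the first hit, so matching inputs stop after the last match instead of scanning everything.
import Mathlib
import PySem

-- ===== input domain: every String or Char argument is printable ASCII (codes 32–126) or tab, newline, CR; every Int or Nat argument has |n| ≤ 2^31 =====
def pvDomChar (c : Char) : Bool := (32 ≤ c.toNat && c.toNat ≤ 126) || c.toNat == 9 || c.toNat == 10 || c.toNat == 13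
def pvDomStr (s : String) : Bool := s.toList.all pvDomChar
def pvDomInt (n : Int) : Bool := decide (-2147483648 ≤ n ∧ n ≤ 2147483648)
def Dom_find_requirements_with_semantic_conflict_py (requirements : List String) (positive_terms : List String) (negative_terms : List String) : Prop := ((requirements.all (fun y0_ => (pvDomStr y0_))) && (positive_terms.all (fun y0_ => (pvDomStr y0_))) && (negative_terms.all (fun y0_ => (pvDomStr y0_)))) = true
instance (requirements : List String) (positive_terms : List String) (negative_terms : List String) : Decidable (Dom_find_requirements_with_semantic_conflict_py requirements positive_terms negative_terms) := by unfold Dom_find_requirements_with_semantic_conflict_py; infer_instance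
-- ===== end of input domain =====

-- ===== PORT A =====
-- B differs from A by two independent reverse early-exit scans instead of one forward pass updating both trackers; same results; a timing run measured B faster on matching inputs (early exit).
-- `x or y` on an Optional[str]: x unless it is None or "" (Python truthiness).
def pyOrStrA (o : Option String) (fb : String) : String :=
  match o with
  | some s => if s = "" then fb else s
  | none => fb

def find_requirements_with_semantic_conflict_py (requirements : List String) (positive_terms : List String) (negative_terms : List String) : String × String :=
  let st := requirements.foldl (fun (st : Option String × Option String) req =>
      let req_lower := PySem.Str.lower req
      let p := if positive_terms.any (fun term => PySem.Str.isIn (PySem.Str.lower term) req_lower) then some req else st.1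
      let n := if negative_terms.any (fun term => PySem.Str.isIn (PySem.Str.lower term) req_lower) then some req else st.2
      (p, n)) (none, none)
  (pyOrStrA st.1 (requirements.getD 0 "Unknown"),
   pyOrStrA st.2 (requirements.getD 1 "Unknown"))

-- ===== PORT B =====
-- reverse scan that returns the first hit (= last matching requirement), lowered terms precomputed
def pvLastMatch (requirements : List String) (terms : List String) : Option String :=
  let lows := terms.map PySem.Str.lower
  requirements.reverse.find? (fun req => lows.any (fun t => PySem.Str.isIn t (PySem.Str.lower req)))

def pyOrStrB (o : Option String) (fb : String) : String :=
  match o with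
  | some s => if s = "" then fb else s
  | none => fb

def find_requirements_with_semantic_conflict_py_alt (requirements : List String) (positive_terms : List String) (negative_terms : List String) : String × String :=
  (pyOrStrB (pvLastMatch requirements positive_terms) (requirements.getD 0 "Unknown"),
   pyOrStrB (pvLastMatch requirements negative_terms) (requirements.getD 1 "Unknown"))

-- ===== PRECONDITION & SPEC =====
def Spec_find_requirements_with_semantic_conflict_py (requirements : List String) (positive_terms : List String) (negative_terms : List String) (out : String × String) : Prop := out = find_requirements_with_semantic_conflict_py_alt requirements positive_terms negative_terms
instance (requirements : List String) (positive_terms : List String) (negative_terms : List String) (out : String × String) : Decidable (Spec_find_requirements_with_semantic_conflict_py requirements positive_terms negative_terms out) := by unfold Spec_find_requirements_with_semantic_conflict_py; infer_instance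

-- ===== CLAIM (what is proved, stated in full; the proofs are below) =====
def Claim_equal_find_requirements_with_semantic_conflict_py : Prop := ∀ (requirements : List String) (positive_terms : List String) (negative_terms : List String), Dom_find_requirements_with_semantic_conflict_py requirements positive_terms negative_terms → Spec_find_requirements_with_semantic_conflict_py requirements positive_terms negative_terms (find_requirements_with_semantic_conflict_py requirements positive_terms negative_terms)

-- ===== LEMMAS AND PROOFS =====
-- a fold over a pair state whose components do not interact splits into two folds
theorem foldl_pair_split {α β : Type} (f g : Option β → α → Option β) :
    ∀ (l : List α) (a b : Option β),
      l.foldl (fun st x => (f st.1 x, g st.2 x)) (a, b) = (l.foldl f a, l.foldl g b) := by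
  intro l
  induction l with
  | nil => intro a b; rfl
  | cons x xs ih => intro a b; simp [List.foldl_cons, ih]

-- the last-match tracker equals the first hit of a reverse scan
theorem foldl_last_match {α : Type} (p : α → Bool) :
    ∀ (l : List α) (init : Option α),
      l.foldl (fun o x => if p x then some x else o) init = (l.reverse.find? p).or init := by
  intro l
  induction l with
  | nil => intro init; simp
  | cons x xs ih =>
    intro init
    simp only [List.foldl_cons, List.reverse_cons, List.find?_append, ih]
    cases h : xs.reverse.find? p with
    | some r => rfl
    | none =>
      cases hx : p x <;> simp [hx, List.find?]

theorem find_requirements_with_semantic_conflict_py_spec : Claim_equal_find_requirements_with_semantic_conflict_py := by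
  intro requirements positive_terms negative_terms _
  unfold Spec_find_requirements_with_semantic_conflict_py
  unfold find_requirements_with_semantic_conflict_py find_requirements_with_semantic_conflict_py_alt pvLastMatch
  simp only [foldl_pair_split
    (fun o req => if positive_terms.any (fun term => PySem.Str.isIn (PySem.Str.lower term) (PySem.Str.lower req)) then some req else o)
    (fun o req => if negative_terms.any (fun term => PySem.Str.isIn (PySem.Str.lower term) (PySem.Str.lower req)) then some req else o),
    foldl_last_match, List.any_map, Function.comp_def, Option.or_none, pyOrStrA, pyOrStrB]
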